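-- pv_equiv track=rewrite | github.com/thehammer/advent-of-management | solutions/2025/day10/solution.py | min_weight_solution
-- ===== SOURCE A (Python) =====
-- from itertools import product
--
-- def min_weight_solution(particular, null_basis):
--     """Find minimum weight solution by trying all combinations of null space vectors."""
--     if not null_basis:
--         return sum(particular)
--
--     min_weight = sum(particular)
--     n_basis = len(null_basis)
--     n_vars = len(particular)
--
--     # Try all 2^n_basis combinations
--     for combo in product([0, 1], repeat=n_basis):
--         sol = particular[:]
--         for i, use in enumerate(combo):
--             if use:
--                 for j in range(n_vars):
--                     sol[j] ^= null_basis[i][j]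
--         weight = sum(sol)
--         min_weight = min(min_weight, weight)
--
--     return min_weight
-- ===== SOURCE B (Python) =====
-- def min_weight_solution(particular, null_basis):
--     """Minimum weight over all XOR-combinations of null space vectors,
--     by branching recursion (include/exclude each basis vector) with shared prefixes."""
--     def best(sol, basis):
--         if not basis:
--             return sum(sol)
--         rest = basis[1:]
--         toggled = [a ^ b for a, b in zip(sol, basis[0])]
--         return min(best(sol, rest), best(toggled, rest))
--     return best(list(particular), null_basis)
-- ===== Notes on version B (the rewrite author's own statement) =====
-- stated objective: faster
-- what changed: Replaces the loop over all 2^n bitmask tuples (each rebuilding the solution from scratch by indexed per-row XOR loops) with a branching recursion on the basis list that shares common prefixes: at each basis vector it recurses on both the untouched and the zip-XOR-toggled solution, so per-combination work drops from O(n_basis*n_vars) to O(n_vars).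
import Mathlib
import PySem

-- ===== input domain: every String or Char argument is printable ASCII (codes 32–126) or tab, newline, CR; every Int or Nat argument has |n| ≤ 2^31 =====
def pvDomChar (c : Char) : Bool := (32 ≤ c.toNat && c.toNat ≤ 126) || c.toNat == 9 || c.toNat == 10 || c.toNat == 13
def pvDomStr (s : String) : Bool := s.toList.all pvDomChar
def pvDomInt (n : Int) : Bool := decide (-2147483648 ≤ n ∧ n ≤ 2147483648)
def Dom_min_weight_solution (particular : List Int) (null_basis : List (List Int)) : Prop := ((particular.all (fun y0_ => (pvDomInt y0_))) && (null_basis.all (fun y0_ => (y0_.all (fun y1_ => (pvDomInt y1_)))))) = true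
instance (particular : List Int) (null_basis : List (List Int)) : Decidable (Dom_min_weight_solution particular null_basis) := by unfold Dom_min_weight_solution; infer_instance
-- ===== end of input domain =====

-- ===== PORT A =====
-- B replaces the all-bitmasks product loop by a prefix-sharing include/exclude recursion
-- on the basis list (avoids recomputing each combination from scratch); return-value equivalence only, neither mutates inputs.

-- sum(xs)
def pySum (xs : List Int) : Int := xs.foldl (· + ·) 0

-- product([0, 1], repeat=n), first coordinate varying slowest (exact order; only the min is used)
def combosA : Nat → List (List Int)
  | 0 => [[]]
  | n + 1 => ([0, 1] : List Int).flatMap (fun b => (combosA n).map (fun t => b :: t))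

-- inner 'for j in range(n_vars): sol[j] ^= null_basis[i][j]'; indices are in range on Pre_
def innerLoop (nvars : Nat) (row : List Int) (sol : List Int) : List Int :=
  (List.range nvars).foldl (fun s j => s.set j (PySem.Int.bxor (s.getD j 0) (row.getD j 0))) sol

-- 'for i, use in enumerate(combo): if use: <innerLoop>'
def applyCombo (nvars : Nat) (nb : List (List Int)) (sol0 : List Int) (combo : List Int) : List Int :=
  (PySem.List.enumerate combo).foldl
    (fun s p => if p.2 ≠ 0 then innerLoop nvars (nb.getD p.1.toNat []) s else s) sol0

def min_weight_solution (particular : List Int) (null_basis : List (List Int)) : Int :=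
  if null_basis = [] then pySum particular
  else
    (combosA null_basis.length).foldl
      (fun mw c => min mw (pySum (applyCombo particular.length null_basis particular c)))
      (pySum particular)

-- ===== PORT B =====
-- best(sol, basis): include/exclude recursion; toggled = [a ^ b for a, b in zip(sol, basis[0])]
def bestB : List Int → List (List Int) → Int
  | sol, [] => pySum sol
  | sol, r :: rest =>
      min (bestB sol rest) (bestB (List.zipWith (fun a b => PySem.Int.bxor a b) sol r) rest)

def min_weight_solution_alt (particular : List Int) (null_basis : List (List Int)) : Int :=
  bestB particular null_basis

-- ===== PRECONDITION & SPEC =====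
-- Pre_ excludes exactly the inputs on which A raises IndexError: a basis row shorter than
-- particular (with particular nonempty the inner loop indexes past the row's end).
def Pre_min_weight_solution (particular : List Int) (null_basis : List (List Int)) : Prop :=
  ∀ r ∈ null_basis, particular.length ≤ r.length
instance (particular : List Int) (null_basis : List (List Int)) : Decidable (Pre_min_weight_solution particular null_basis) := by unfold Pre_min_weight_solution; infer_instance

def pvWitness_min_weight_solution : List Int × List (List Int) := ([1, 2], [[1, 0], [3, 1]])

def Spec_min_weight_solution (particular : List Int) (null_basis : List (List Int)) (out : Int) : Prop := out = min_weight_solution_alt particular null_basis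
instance (particular : List Int) (null_basis : List (List Int)) (out : Int) : Decidable (Spec_min_weight_solution particular null_basis out) := by unfold Spec_min_weight_solution; infer_instance

-- ===== CLAIM (what is proved, stated in full; the proofs are below) =====
def Claim_equal_min_weight_solution : Prop := ∀ (particular : List Int) (null_basis : List (List Int)), Dom_min_weight_solution particular null_basis → Pre_min_weight_solution particular null_basis → Spec_min_weight_solution particular null_basis (min_weight_solution particular null_basis)

-- ===== LEMMAS AND PROOFS =====

-- zip truncation on the right is harmless
theorem zipWith_take_right (f : Int → Int → Int) :
    ∀ (s row : List Int), List.zipWith f s (row.take s.length) = List.zipWith f s row := by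
  intro s
  induction s with
  | nil => intro row; simp
  | cons a s ih =>
      intro row
      cases row with
      | nil => simp
      | cons b row => simp [ih]

-- the indexed in-place XOR loop computes a pointwise zipWith on the processed prefix
theorem innerLoop_range (row : List Int) :
    ∀ (n : Nat) (s : List Int), n ≤ s.length → n ≤ row.length →
    (List.range n).foldl (fun s j => s.set j (PySem.Int.bxor (s.getD j 0) (row.getD j 0))) s
      = List.zipWith (fun a b => PySem.Int.bxor a b) (s.take n) (row.take n) ++ s.drop n := by
  intro n
  induction n with
  | zero => intro s _ _; simp
  | succ n ih =>
      intro s hs hr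
      rw [List.range_succ, List.foldl_append]
      rw [ih s (by omega) (by omega)]
      have hlen : (List.zipWith (fun a b => PySem.Int.bxor a b) (s.take n) (row.take n)).length = n := by
        simp; omega
      have hsn : n < s.length := by omega
      have hrn : n < row.length := by omega
      have hget : (List.zipWith (fun a b => PySem.Int.bxor a b) (s.take n) (row.take n) ++ s.drop n).getD n 0
          = s[n] := by
        rw [List.getD_eq_getElem?_getD, List.getElem?_append_right (by omega)]
        simp [hlen, List.getElem?_drop, List.getElem?_eq_getElem hsn]
      have hset : (List.zipWith (fun a b => PySem.Int.bxor a b) (s.take n) (row.take n) ++ s.drop n).set n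
            (PySem.Int.bxor s[n] (row.getD n 0))
          = List.zipWith (fun a b => PySem.Int.bxor a b) (s.take (n+1)) (row.take (n+1)) ++ s.drop (n+1) := by
        rw [List.set_append_right _ _ (by omega), hlen]
        have hdrop : s.drop n = s[n] :: s.drop (n+1) := by
          rw [List.drop_eq_getElem_cons hsn]
        rw [hdrop]
        simp only [Nat.sub_self, List.set_cons_zero]
        rw [List.take_add_one, List.take_add_one,
            List.getElem?_eq_getElem hsn, List.getElem?_eq_getElem hrn]
        rw [List.zipWith_append (by simp; omega)]
        simp [List.getD_eq_getElem?_getD, List.getElem?_eq_getElem hrn]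
      simp only [List.foldl_cons, List.foldl_nil, hget, hset]

theorem innerLoop_eq (row s : List Int) (h : s.length ≤ row.length) :
    innerLoop s.length row s = List.zipWith (fun a b => PySem.Int.bxor a b) s row := by
  unfold innerLoop
  rw [innerLoop_range row s.length s le_rfl h]
  simp [← zipWith_take_right (fun a b => PySem.Int.bxor a b) s row]

-- enumerate-indexed application = fold over the zip of combo with the basis rows
def applyZip (s : List Int) (nb : List (List Int)) (c : List Int) : List Int :=
  (c.zip nb).foldl (fun t p => if p.1 ≠ 0 then List.zipWith (fun a b => PySem.Int.bxor a b) t p.2 else t) s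

theorem zipWith_len (s r : List Int) (h : s.length ≤ r.length) :
    (List.zipWith (fun a b : Int => PySem.Int.bxor a b) s r).length = s.length := by
  simp; omega

theorem applyCombo_eq_applyZip (full : List (List Int)) (nv : Nat) :
    ∀ (c : List Int) (nb : List (List Int)) (k : Nat) (s : List Int),
    full.drop k = nb → c.length = nb.length → s.length = nv →
    (∀ r ∈ nb, nv ≤ r.length) →
    (PySem.List.enumerate c (k : Int)).foldl
      (fun s p => if p.2 ≠ 0 then innerLoop nv (full.getD p.1.toNat []) s else s) s
      = applyZip s nb c := by
  intro c
  induction c with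
  | nil => intro nb k s _ _ _ _; simp [PySem.List.enumerate_nil, applyZip]
  | cons b t ih =>
      intro nb k s hdrop hlen hs hrows
      cases nb with
      | nil => simp at hlen
      | cons r rest =>
          have hk : full[k]? = some r := by
            have : (full.drop k)[0]? = some r := by rw [hdrop]; rfl
            rwa [List.getElem?_drop, Nat.add_zero] at this
          have hdrop1 : full.drop (k + 1) = rest := by
            have : (full.drop k).drop 1 = rest := by rw [hdrop]; rfl
            simpa [List.drop_drop, Nat.add_comm] using this
          have hr : nv ≤ r.length := hrows r (by simp)
          rw [PySem.List.enumerate_cons, List.foldl_cons]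
          simp only [Int.toNat_natCast]
          have hfull : full.getD k [] = r := by
            rw [List.getD_eq_getElem?_getD, hk]; rfl
          rw [hfull]
          have hstep : (if b ≠ 0 then innerLoop nv r s else s)
              = (if b ≠ 0 then List.zipWith (fun a b => PySem.Int.bxor a b) s r else s) := by
            by_cases hb : b = 0
            · simp [hb]
            · simp only [hb, if_pos, ne_eq, not_false_iff]
              rw [← hs] at hr ⊢
              exact innerLoop_eq r s hr
          rw [hstep]
          have hcast : (k : Int) + 1 = ((k + 1 : Nat) : Int) := by push_cast; ring
          rw [hcast]
          rw [ih rest (k + 1) _ hdrop1 (by simpa using hlen) ?_ (fun r' hr' => hrows r' (by simp [hr']))]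
          · simp [applyZip, List.zip_cons_cons]
          · by_cases hb : b = 0
            · simpa [hb] using hs
            · simp only [hb, ne_eq, not_false_iff, if_true]
              rw [zipWith_len s r (hs ▸ hr)]
              exact hs

-- every generated combo has the right length, and the first is all zeros
theorem combosA_length : ∀ (n : Nat) (c : List Int), c ∈ combosA n → c.length = n := by
  intro n
  induction n with
  | zero => intro c hc; simp [combosA] at hc; simp [hc]
  | succ n ih =>
      intro c hc
      simp only [combosA, List.mem_flatMap, List.mem_map] at hc
      obtain ⟨b, _, t, ht, rfl⟩ := hc
      simp [ih t ht]

theorem combosA_head : ∀ (n : Nat), ∃ tl, combosA n = List.replicate n (0 : Int) :: tl := by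
  intro n
  induction n with
  | zero => exact ⟨[], rfl⟩
  | succ n ih =>
      obtain ⟨tl, htl⟩ := ih
      refine ⟨(combosA n).tail.map (fun t => (0 : Int) :: t) ++ (combosA n).map (fun t => (1 : Int) :: t), ?_⟩
      simp only [combosA, List.flatMap_cons, List.flatMap_cons, List.flatMap_nil, List.append_nil]
      rw [htl]
      simp [List.replicate_succ]

theorem applyZip_zero (nb : List (List Int)) :
    ∀ (n : Nat) (s : List Int), applyZip s nb (List.replicate n 0) = s := by
  intro n
  induction n generalizing nb with
  | zero => intro s; simp [applyZip]
  | succ n ih =>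
      intro s
      cases nb with
      | nil => simp [applyZip]
      | cons r rest =>
          have h := ih rest s
          simpa [applyZip, List.replicate_succ, List.zip_cons_cons] using h

-- pulling the seed out of a foldl-min
theorem foldl_min_pull : ∀ (l : List Int) (a b : Int),
    l.foldl min (min a b) = min a (l.foldl min b) := by
  intro l
  induction l with
  | nil => intro a b; simp
  | cons x l ih =>
      intro a b
      simp only [List.foldl_cons]
      rw [min_assoc, ih]

theorem main_lemma : ∀ (nb : List (List Int)) (s : List Int),
    (∀ r ∈ nb, s.length ≤ r.length) →
    (combosA nb.length).foldl (fun mw c => min mw (pySum (applyZip s nb c))) (pySum s)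
      = bestB s nb := by
  intro nb
  induction nb with
  | nil =>
      intro s _
      simp [combosA, applyZip, bestB]
  | cons r rest ih =>
      intro s hrows
      have hr : s.length ≤ r.length := hrows r (by simp)
      set s' := List.zipWith (fun a b : Int => PySem.Int.bxor a b) s r with hs'
      have hs'len : s'.length = s.length := zipWith_len s r hr
      have hrows' : ∀ r' ∈ rest, s'.length ≤ r'.length := by
        intro r' h; rw [hs'len]; exact hrows r' (by simp [h])
      have hzip0 : ∀ c, applyZip s (r :: rest) ((0 : Int) :: c) = applyZip s rest c := by
        intro c; simp [applyZip, List.zip_cons_cons]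
      have hzip1 : ∀ c, applyZip s (r :: rest) ((1 : Int) :: c) = applyZip s' rest c := by
        intro c; simp [applyZip, List.zip_cons_cons, hs']
      simp only [List.length_cons, combosA, List.flatMap_cons, List.flatMap_nil,
        List.append_nil, List.foldl_append, List.foldl_map]
      have h0 : (combosA rest.length).foldl
          (fun mw c => min mw (pySum (applyZip s (r :: rest) ((0:Int) :: c)))) (pySum s)
          = bestB s rest := by
        refine Eq.trans ?_ (ih s (fun r' h => hrows r' (by simp [h])))
        exact PySem.List.foldl_congr_mem' _ _ _ _ (fun c _ acc => by rw [hzip0])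
      rw [h0]
      have hB' : (combosA rest.length).foldl
          (fun mw c => min mw (pySum (applyZip s' rest c))) (pySum s')
          = bestB s' rest := ih s' hrows'
      obtain ⟨tl, htl⟩ := combosA_head rest.length
      have hw0 : pySum (applyZip s' rest (List.replicate rest.length 0)) = pySum s' := by
        rw [applyZip_zero]
      have key : ∀ a : Int, tl.foldl (fun mw c => min mw (pySum (applyZip s' rest c))) (min a (pySum s'))
          = min a (tl.foldl (fun mw c => min mw (pySum (applyZip s' rest c))) (pySum s')) := by
        intro a
        have := foldl_min_pull (tl.map (fun c => pySum (applyZip s' rest c))) a (pySum s')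
        simpa [List.foldl_map] using this
      have hfold' : tl.foldl (fun mw c => min mw (pySum (applyZip s' rest c))) (pySum s')
          = bestB s' rest := by
        rw [htl] at hB'
        simpa [hw0] using hB'
      calc (combosA rest.length).foldl
            (fun mw c => min mw (pySum (applyZip s (r :: rest) ((1:Int) :: c)))) (bestB s rest)
          = (combosA rest.length).foldl
            (fun mw c => min mw (pySum (applyZip s' rest c))) (bestB s rest) :=
            PySem.List.foldl_congr_mem' _ _ _ _ (fun c _ acc => by rw [hzip1])
        _ = tl.foldl (fun mw c => min mw (pySum (applyZip s' rest c)))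
              (min (bestB s rest) (pySum s')) := by
            rw [htl]; simp [hw0]
        _ = min (bestB s rest) (bestB s' rest) := by rw [key, hfold']
        _ = bestB s (r :: rest) := rfl

-- ===== VERDICT (by name: the statement is the Claim_ definition above) =====
theorem min_weight_solution_spec : Claim_equal_min_weight_solution := by
  intro particular null_basis _ hpre
  unfold Spec_min_weight_solution min_weight_solution min_weight_solution_alt
  by_cases hnb : null_basis = []
  · simp [hnb, bestB]
  · rw [if_neg hnb]
    have hcon : (combosA null_basis.length).foldl
        (fun mw c => min mw (pySum (applyCombo particular.length null_basis particular c)))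
        (pySum particular)
        = (combosA null_basis.length).foldl
        (fun mw c => min mw (pySum (applyZip particular null_basis c))) (pySum particular) := by
      refine PySem.List.foldl_congr_mem' _ _ _ _ (fun c hc acc => ?_)
      have h := applyCombo_eq_applyZip null_basis particular.length c null_basis 0 particular
        (by simp) (by simp [combosA_length _ c hc]) rfl hpre
      rw [show ((0 : Nat) : Int) = (0 : Int) from rfl] at h
      simp only [applyCombo]
      rw [h]
    rw [hcon]
    exact main_lemma null_basis particular hpre
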